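-- pv_equiv track=rewrite | github.com/selenanguyen/AI-code-samples | Assignment2/othello.py | captures_in_dir
-- ===== SOURCE A (Python) =====
-- NUM_COLUMNS = 8
--
-- WHITE = 1
--
-- NOBODY = 0
--
-- BLACK = -1
--
-- def captures_in_dir(board, row, row_delta, col, col_delta, white_turn):
--     # Can't capture if headed off the board
--     if (row+row_delta < 0) or (row+row_delta >= NUM_COLUMNS):
--         return False
--     if (col+col_delta < 0) or (col+col_delta >= NUM_COLUMNS):
--         return False
--
--     # Can't capture if piece in that direction is not of appropriate color or missing
--     enemy_color = BLACK if white_turn else WHITE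
--     if board[row+row_delta][col+col_delta] != enemy_color:
--         return False
--
--     # At least one enemy piece in this direction, so just need to scan until we
--     # find a friendly piece (return True) or hit an empty spot or edge of board
--     # (return False)
--     friendly_color = WHITE if white_turn else BLACK
--     scan_row = row + 2*row_delta # row of first scan position
--     scan_col = col + 2*col_delta # col of first scan position
--     while (scan_row >= 0) and (scan_row < NUM_COLUMNS) and (scan_col >= 0) and (scan_col < NUM_COLUMNS):
--         if board[scan_row][scan_col] == NOBODY:
--             return False
--         if board[scan_row][scan_col] == friendly_color:
--             return True
--         scan_row += row_delta
--         scan_col += col_delta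
--     return False
-- ===== SOURCE B (Python) =====
-- NUM_COLUMNS = 8
--
-- WHITE = 1
--
-- NOBODY = 0
--
-- BLACK = -1
--
-- def captures_in_dir(board, row, row_delta, col, col_delta, white_turn):
--     # Pass 1: materialize the ray of cell values, starting at the adjacent cell.
--     ray = []
--     r, c = row + row_delta, col + col_delta
--     while 0 <= r < NUM_COLUMNS and 0 <= c < NUM_COLUMNS:
--         ray.append(board[r][c])
--         r += row_delta
--         c += col_delta
--     # Pass 2: decide from the list.
--     enemy_color = BLACK if white_turn else WHITE
--     if not ray or ray[0] != enemy_color: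
--         return False
--     friendly_color = WHITE if white_turn else BLACK
--     for v in ray[1:]:
--         if v == NOBODY:
--             return False
--         if v == friendly_color:
--             return True
--     return False
-- ===== Notes on version B (the rewrite author's own statement) =====
-- stated objective: alternative
-- what changed: A interleaves bounds checks, the adjacent-cell enemy test and the scan in one check-then-loop flow; B first materializes the whole in-board ray of cell values as a list and then decides purely from that list (head must be the enemy color, then scan the tail for friendly before an empty cell).
-- outside the precondition, e.g. on captures_in_dir([[-1, 0]], 0, 0, 0, 1, True): A returns False, B raises IndexError; on captures_in_dir([[0]], 0, 0, 0, 0, True): A returns False, B does not finish within the time limit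
import Mathlib
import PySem

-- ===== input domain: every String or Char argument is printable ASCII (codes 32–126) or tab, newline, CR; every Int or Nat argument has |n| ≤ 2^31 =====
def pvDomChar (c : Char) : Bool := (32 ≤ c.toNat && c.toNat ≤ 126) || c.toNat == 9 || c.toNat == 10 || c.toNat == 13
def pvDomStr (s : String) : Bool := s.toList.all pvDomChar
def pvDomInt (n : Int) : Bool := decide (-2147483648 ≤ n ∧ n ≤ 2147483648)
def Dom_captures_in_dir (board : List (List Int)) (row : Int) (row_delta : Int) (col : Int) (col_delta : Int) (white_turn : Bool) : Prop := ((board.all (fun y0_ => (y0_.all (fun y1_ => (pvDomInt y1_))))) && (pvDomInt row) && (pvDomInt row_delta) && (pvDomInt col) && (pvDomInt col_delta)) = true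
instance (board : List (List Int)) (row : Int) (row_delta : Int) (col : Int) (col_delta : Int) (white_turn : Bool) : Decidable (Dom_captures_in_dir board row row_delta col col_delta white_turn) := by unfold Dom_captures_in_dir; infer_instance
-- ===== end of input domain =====

-- B builds the in-board ray of cell values as a list first and then decides from that list,
-- instead of A's interleaved check-then-scan loop (objective: alternative decomposition).

-- ===== PORT A =====
-- board[r][c]; on Pre_ inputs every access is in range, so the default is never used
def pvCell (board : List (List Int)) (r c : Int) : Int :=
  (PySem.List.pyGet? ((PySem.List.pyGet? board r).getD []) c).getD 0

-- A's while loop; the fuel 16 is never exhausted on Pre_ inputs (the loop runs ≤ 7 steps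
-- when the deltas are not both zero, since in-range scan cells are ≤ 8 consecutive steps)
def pvAScan (board : List (List Int)) (friendly row_delta col_delta : Int) : Nat → Int → Int → Bool
  | 0, _, _ => false
  | fuel+1, r, c =>
    if 0 ≤ r ∧ r < 8 ∧ 0 ≤ c ∧ c < 8 then
      if pvCell board r c = 0 then false
      else if pvCell board r c = friendly then true
      else pvAScan board friendly row_delta col_delta fuel (r + row_delta) (c + col_delta)
    else false

def captures_in_dir (board : List (List Int)) (row : Int) (row_delta : Int) (col : Int) (col_delta : Int) (white_turn : Bool) : Bool :=
  if row + row_delta < 0 ∨ row + row_delta ≥ 8 then false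
  else if col + col_delta < 0 ∨ col + col_delta ≥ 8 then false
  else
    let enemy : Int := if white_turn then -1 else 1
    if pvCell board (row + row_delta) (col + col_delta) ≠ enemy then false
    else
      let friendly : Int := if white_turn then 1 else -1
      pvAScan board friendly row_delta col_delta 16 (row + 2*row_delta) (col + 2*col_delta)

-- ===== PORT B =====
-- pass 1 of Source B: collect board[r][c] while (r,c) stays on the 8×8 board (fuel 17 never
-- exhausted on Pre_ inputs, where the ray has ≤ 8 cells)
def pvRay (board : List (List Int)) (row_delta col_delta : Int) : Nat → Int → Int → List Int
  | 0, _, _ => []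
  | fuel+1, r, c =>
    if 0 ≤ r ∧ r < 8 ∧ 0 ≤ c ∧ c < 8 then
      pvCell board r c :: pvRay board row_delta col_delta fuel (r + row_delta) (c + col_delta)
    else []

-- pass 2 of Source B: the for-loop over ray[1:]
def pvAnalyze (friendly : Int) : List Int → Bool
  | [] => false
  | v :: rest => if v = 0 then false else if v = friendly then true else pvAnalyze friendly rest

def captures_in_dir_alt (board : List (List Int)) (row : Int) (row_delta : Int) (col : Int) (col_delta : Int) (white_turn : Bool) : Bool :=
  let ray := pvRay board row_delta col_delta 17 (row + row_delta) (col + col_delta)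
  let enemy : Int := if white_turn then -1 else 1
  match ray with
  | [] => false
  | h :: t =>
    if h ≠ enemy then false
    else
      let friendly : Int := if white_turn then 1 else -1
      pvAnalyze friendly t

-- ===== PRECONDITION & SPEC =====
-- cell (r,c) exists in the (possibly ragged) board
def pvInB (board : List (List Int)) (r c : Int) : Prop :=
  r.toNat < board.length ∧ c.toNat < (board.getD r.toNat []).length

-- (r,c) is on the conceptual 8×8 board
def pvInR (r c : Int) : Prop := 0 ≤ r ∧ r < 8 ∧ 0 ≤ c ∧ c < 8

-- Pre_ excludes exactly the inputs where a program's ray walk goes wrong: both deltas zero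
-- (A loops forever when the adjacent cell holds the enemy color, and B's ray-building pass
-- always loops there), and inputs whose consecutive in-range ray cells are missing from a
-- too-small/ragged board (A raises IndexError when it reaches such a cell, and B, which
-- materializes the whole ray before deciding, raises even when A happens to return early).
def Pre_captures_in_dir (board : List (List Int)) (row : Int) (row_delta : Int) (col : Int) (col_delta : Int) (white_turn : Bool) : Prop :=
  ¬ (row_delta = 0 ∧ col_delta = 0) ∧
  ∀ k ∈ [1, 2, 3, 4, 5, 6, 7, 8],
    (∀ j ∈ [1, 2, 3, 4, 5, 6, 7, 8], j ≤ k → pvInR (row + (j : Int) * row_delta) (col + (j : Int) * col_delta)) →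
    pvInB board (row + (k : Int) * row_delta) (col + (k : Int) * col_delta)
instance (board : List (List Int)) (row : Int) (row_delta : Int) (col : Int) (col_delta : Int) (white_turn : Bool) : Decidable (Pre_captures_in_dir board row row_delta col col_delta white_turn) := by
  unfold Pre_captures_in_dir pvInR pvInB; infer_instance

def pvWitness_captures_in_dir : List (List Int) × Int × Int × Int × Int × Bool :=
  ([[0, 0, 0, 0, 0, 0, 0, 0],
    [0, 0, 0, 0, 0, 0, 0, 0],
    [0, 0, 0, 0, 0, 0, 0, 0],
    [0, 0, 0, -1, 1, 0, 0, 0],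
    [0, 0, 0, 1, -1, 0, 0, 0],
    [0, 0, 0, 0, 0, 0, 0, 0],
    [0, 0, 0, 0, 0, 0, 0, 0],
    [0, 0, 0, 0, 0, 0, 0, 0]], 3, 1, 2, 1, true)

def Spec_captures_in_dir (board : List (List Int)) (row : Int) (row_delta : Int) (col : Int) (col_delta : Int) (white_turn : Bool) (out : Bool) : Prop := out = captures_in_dir_alt board row row_delta col col_delta white_turn
instance (board : List (List Int)) (row : Int) (row_delta : Int) (col : Int) (col_delta : Int) (white_turn : Bool) (out : Bool) : Decidable (Spec_captures_in_dir board row row_delta col col_delta white_turn out) := by unfold Spec_captures_in_dir; infer_instance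

-- ===== CLAIM (what is proved, stated in full; the proofs are below) =====
def Claim_equal_captures_in_dir : Prop := ∀ (board : List (List Int)) (row : Int) (row_delta : Int) (col : Int) (col_delta : Int) (white_turn : Bool), Dom_captures_in_dir board row row_delta col col_delta white_turn → Pre_captures_in_dir board row row_delta col col_delta white_turn → Spec_captures_in_dir board row row_delta col col_delta white_turn (captures_in_dir board row row_delta col col_delta white_turn)

-- ===== LEMMAS AND PROOFS =====
theorem pvWitness_ok :
    Dom_captures_in_dir pvWitness_captures_in_dir.1 pvWitness_captures_in_dir.2.1 pvWitness_captures_in_dir.2.2.1 pvWitness_captures_in_dir.2.2.2.1 pvWitness_captures_in_dir.2.2.2.2.1 pvWitness_captures_in_dir.2.2.2.2.2 ∧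
    Pre_captures_in_dir pvWitness_captures_in_dir.1 pvWitness_captures_in_dir.2.1 pvWitness_captures_in_dir.2.2.1 pvWitness_captures_in_dir.2.2.2.1 pvWitness_captures_in_dir.2.2.2.2.1 pvWitness_captures_in_dir.2.2.2.2.2 := by
  decide

-- analyzing the materialized ray is the same as A's interleaved scan, step for step
theorem pvAnalyze_pvRay (board : List (List Int)) (friendly row_delta col_delta : Int) :
    ∀ (fuel : Nat) (r c : Int),
      pvAnalyze friendly (pvRay board row_delta col_delta fuel r c) =
        pvAScan board friendly row_delta col_delta fuel r c := by
  intro fuel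
  induction fuel with
  | zero => intro r c; rfl
  | succ n ih =>
    intro r c
    by_cases h : 0 ≤ r ∧ r < 8 ∧ 0 ≤ c ∧ c < 8
    · simp only [pvRay, pvAScan, if_pos h, pvAnalyze]
      split_ifs with h0 hf
      · rfl
      · rfl
      · exact ih _ _
    · simp only [pvRay, pvAScan, if_neg h, pvAnalyze]

-- one-step unfolding of the ray builder
theorem pvRay_succ (board : List (List Int)) (row_delta col_delta : Int) (fuel : Nat) (r c : Int) :
    pvRay board row_delta col_delta (fuel + 1) r c =
      if 0 ≤ r ∧ r < 8 ∧ 0 ≤ c ∧ c < 8 then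
        pvCell board r c :: pvRay board row_delta col_delta fuel (r + row_delta) (c + col_delta)
      else [] := rfl

-- B's port, rewritten to A's branch shape (the match and the head test unfolded one step)
theorem alt_shape (board : List (List Int)) (row row_delta col col_delta : Int) (white_turn : Bool) :
    captures_in_dir_alt board row row_delta col col_delta white_turn =
      if 0 ≤ row + row_delta ∧ row + row_delta < 8 ∧ 0 ≤ col + col_delta ∧ col + col_delta < 8 then
        if pvCell board (row + row_delta) (col + col_delta) ≠ (if white_turn then (-1 : Int) else 1) then false
        else pvAScan board (if white_turn then 1 else -1) row_delta col_delta 16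
               (row + row_delta + row_delta) (col + col_delta + col_delta)
      else false := by
  unfold captures_in_dir_alt
  rw [show (17 : Nat) = 16 + 1 from rfl, pvRay_succ]
  by_cases h : 0 ≤ row + row_delta ∧ row + row_delta < 8 ∧ 0 ≤ col + col_delta ∧ col + col_delta < 8
  · rw [if_pos h, if_pos h]
    dsimp only
    rw [pvAnalyze_pvRay]
  · rw [if_neg h, if_neg h]

-- ===== VERDICT (by name: the statement is the Claim_ definition above) =====
theorem captures_in_dir_spec : Claim_equal_captures_in_dir := by
  intro board row row_delta col col_delta white_turn _ _
  unfold Spec_captures_in_dir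
  rw [alt_shape]
  unfold captures_in_dir
  have hrw : row + row_delta + row_delta = row + 2 * row_delta := by ring
  have hcw : col + col_delta + col_delta = col + 2 * col_delta := by ring
  by_cases h1 : row + row_delta < 0 ∨ row + row_delta ≥ 8
  · rw [if_pos h1,
      if_neg (show ¬(0 ≤ row + row_delta ∧ row + row_delta < 8 ∧ 0 ≤ col + col_delta ∧ col + col_delta < 8) by omega)]
  · rw [if_neg h1]
    by_cases h2 : col + col_delta < 0 ∨ col + col_delta ≥ 8
    · rw [if_pos h2,
        if_neg (show ¬(0 ≤ row + row_delta ∧ row + row_delta < 8 ∧ 0 ≤ col + col_delta ∧ col + col_delta < 8) by omega)]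
    · rw [if_neg h2,
        if_pos (show 0 ≤ row + row_delta ∧ row + row_delta < 8 ∧ 0 ≤ col + col_delta ∧ col + col_delta < 8 by omega)]
      rw [hrw, hcw]
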